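-- pv_equiv track=rewrite | github.com/anurupojha/campaign-setup | scripts/process_scan_homepage_config.py | find_insertion_index
-- ===== SOURCE A (Python) =====
-- def find_insertion_index(configs):
--     """
--     Find insertion point with cascading fallbacks.
--     Try each system config marker in order until one is found.
--     Insert BEFORE the first one found.
--     """
--     system_config_order = [
--         'widget_assured_20_and',      # Try first
--         'widget_assured_20_ios',      # Fallback 1
--         'widget_campaign_and',        # Fallback 2
--         'widget_campaign_ios',        # Fallback 3
--         'wr_pay_ios',                 # Fallback 4
--         'wr_pay_android',             # Fallback 5
--         'snp_catch_all'               # Fallback 6 (catch-all - should always exist)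
--     ]
--
--     for marker in system_config_order:
--         for i, config in enumerate(configs):
--             if config.get('config_key') == marker:
--                 return i  # Insert BEFORE this config
--
--     # Last resort: append at end (if all 7 system configs removed - unlikely)
--     return len(configs)
-- ===== SOURCE B (Python) =====
-- def find_insertion_index(configs):
--     """One pass: index each config_key by its first occurrence, then look up markers in priority order."""
--     system_config_order = [
--         'widget_assured_20_and',
--         'widget_assured_20_ios',
--         'widget_campaign_and',
--         'widget_campaign_ios',
--         'wr_pay_ios',
--         'wr_pay_android',
--         'snp_catch_all',
--     ]
--     first_index = {}
--     for i, config in enumerate(configs):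
--         k = config.get('config_key')
--         if k is not None and k not in first_index:
--             first_index[k] = i
--     for marker in system_config_order:
--         if marker in first_index:
--             return first_index[marker]
--     return len(configs)
-- ===== Notes on version B (the rewrite author's own statement) =====
-- stated objective: alternative
-- what changed: B builds a first-occurrence index of config_key values in one pass over configs and then looks up the seven markers, instead of A's rescanning the whole list once per marker; same measured cost since A usually matches early.
import Mathlib
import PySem

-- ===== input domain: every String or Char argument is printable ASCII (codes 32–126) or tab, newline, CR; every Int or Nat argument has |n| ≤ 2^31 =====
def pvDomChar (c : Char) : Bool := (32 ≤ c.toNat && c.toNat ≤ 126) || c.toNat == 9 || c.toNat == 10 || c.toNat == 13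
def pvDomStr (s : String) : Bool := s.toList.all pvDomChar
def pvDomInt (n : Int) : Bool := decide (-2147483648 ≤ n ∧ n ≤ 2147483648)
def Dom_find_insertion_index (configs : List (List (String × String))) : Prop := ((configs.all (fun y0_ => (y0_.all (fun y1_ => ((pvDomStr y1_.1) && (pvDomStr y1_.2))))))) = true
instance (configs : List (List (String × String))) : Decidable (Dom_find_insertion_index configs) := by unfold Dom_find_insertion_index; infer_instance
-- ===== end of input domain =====

-- B replaces A's seven full scans (one per priority marker) by a single
-- first-occurrence index over configs plus one lookup per marker.

def pvOrder : List String :=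
  ["widget_assured_20_and", "widget_assured_20_ios", "widget_campaign_and",
   "widget_campaign_ios", "wr_pay_ios", "wr_pay_android", "snp_catch_all"]

-- ===== PORT A =====
-- inner 'for i, config in enumerate(configs): if config.get('config_key') == marker: return i'
def pvScanA (marker : String) : List (List (String × String)) → Int → Option Int
  | [], _ => none
  | c :: rest, i =>
      if (PySem.Dict.mk c).get? "config_key" = some marker then some i
      else pvScanA marker rest (i + 1)

-- outer 'for marker in system_config_order: …; return len(configs)'
def pvLoopA (configs : List (List (String × String))) : List String → Int
  | [] => (configs.length : Int)
  | m :: ms =>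
      match pvScanA m configs 0 with
      | some i => i
      | none => pvLoopA configs ms

def find_insertion_index (configs : List (List (String × String))) : Int :=
  pvLoopA configs pvOrder

-- ===== PORT B =====
-- 'for i, config in enumerate(configs): k = config.get("config_key"); if k is not None and k not in first_index: first_index[k] = i'
def pvBuild : List (List (String × String)) → Int → PySem.Dict String Int → PySem.Dict String Int
  | [], _, d => d
  | c :: rest, i, d =>
      match (PySem.Dict.mk c).get? "config_key" with
      | some k => pvBuild rest (i + 1) (if d.contains k then d else d.insert k i)
      | none => pvBuild rest (i + 1) d

-- 'for marker in system_config_order: if marker in first_index: return first_index[marker]; return len(configs)'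
def pvLookup (d : PySem.Dict String Int) (n : Int) : List String → Int
  | [] => n
  | m :: ms =>
      match d.get? m with
      | some i => i
      | none => pvLookup d n ms

def find_insertion_index_alt (configs : List (List (String × String))) : Int :=
  pvLookup (pvBuild configs 0 PySem.Dict.empty) (configs.length : Int) pvOrder

-- ===== PRECONDITION & SPEC =====
def Spec_find_insertion_index (configs : List (List (String × String))) (out : Int) : Prop := out = find_insertion_index_alt configs
instance (configs : List (List (String × String))) (out : Int) : Decidable (Spec_find_insertion_index configs out) := by unfold Spec_find_insertion_index; infer_instance

-- ===== CLAIM (what is proved, stated in full; the proofs are below) =====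
def Claim_equal_find_insertion_index : Prop := ∀ (configs : List (List (String × String))), Dom_find_insertion_index configs → Spec_find_insertion_index configs (find_insertion_index configs)

-- ===== LEMMAS AND PROOFS =====

-- the built index answers exactly what A's fresh scan answers (first occurrence wins)
theorem pvBuild_get? (configs : List (List (String × String))) (i : Int)
    (d : PySem.Dict String Int) (m : String) :
    (pvBuild configs i d).get? m = ((d.get? m).orElse (fun _ => pvScanA m configs i)) := by
  induction configs generalizing i d with
  | nil => simp [pvBuild, pvScanA]
  | cons c rest ih =>
    simp only [pvBuild, pvScanA]
    cases hk : (PySem.Dict.mk c).get? "config_key" with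
    | none =>
      rw [ih]
      simp [hk]
    | some k =>
      by_cases hc : d.contains k = true
      · simp only [hc, if_true, ih]
        by_cases hm : k = m
        · subst hm
          have : (d.get? k).isSome := by rw [← PySem.Dict.contains_eq_isSome_get?]; exact hc
          cases hd : d.get? k with
          | none => simp [hd] at this
          | some v => simp [hk, Option.orElse, hd]
        · simp [hk, hm, Option.orElse]
      · simp only [Bool.not_eq_true] at hc
        simp only [hc, if_false, ih]
        by_cases hm : k = m
        · subst hm
          have hd : d.get? k = none := by
            cases hd : d.get? k with
            | none => rfl
            | some v =>
              have := PySem.Dict.contains_eq_isSome_get? (d := d) (k := k)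
              rw [hd] at this; simp [this] at hc
          simp [hk, PySem.Dict.get?_insert_self, hd, Option.orElse]
        · simp [PySem.Dict.get?_insert, Ne.symm hm, hm, Option.orElse]

theorem pvLookup_eq (configs : List (List (String × String))) (ms : List String) :
    pvLookup (pvBuild configs 0 PySem.Dict.empty) (configs.length : Int) ms
      = pvLoopA configs ms := by
  induction ms with
  | nil => rfl
  | cons m rest ih =>
    simp only [pvLookup, pvLoopA, pvBuild_get?, PySem.Dict.get?_empty, Option.orElse]
    cases pvScanA m configs 0 <;> simp [ih]

-- ===== VERDICT (by name: the statement is the Claim_ definition above) =====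
theorem find_insertion_index_spec : Claim_equal_find_insertion_index := by
  intro configs _
  unfold Spec_find_insertion_index find_insertion_index find_insertion_index_alt
  exact (pvLookup_eq configs pvOrder).symm
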